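-- pv_equiv track=rewrite | github.com/Bracktus/Noisy-Tournament-Ranking | final/rankers.py | win_count
-- ===== SOURCE A (Python) =====
-- from collections import defaultdict
--
-- def win_count(tournament):
--     """
--     The copeland score of a student is:
--     The node's outdegree - the node's indegree
--     Optionally is weighted
--     """
--     matchups = tournament.values()
--     matchups = [matchup for sublist in matchups for matchup in sublist]
--     copeland_scores = defaultdict(int)
--     for grader in tournament:
--         for match in matchups:
--             winner, loser = match
--             if grader == winner:
--                 copeland_scores[grader] += 1
--             elif grader == loser:
--                 copeland_scores[grader] -= 1
--
--     ranking = copeland_scores.items()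
--     ranking = sorted(ranking, key=lambda i: i[1], reverse=True)
--     ranking = [student for (student, _) in ranking]
--     return ranking
-- ===== SOURCE B (Python) =====
-- def win_count(tournament):
--     counts = {}
--     for matchup in tournament.values():
--         for winner, loser in matchup:
--             counts[winner] = counts.get(winner, 0) + 1
--             if loser != winner:
--                 counts[loser] = counts.get(loser, 0) - 1
--     ranking = [(g, counts[g]) for g in tournament if g in counts]
--     ranking.sort(key=lambda p: p[1], reverse=True)
--     return [g for g, _ in ranking]
-- ===== Notes on version B (the rewrite author's own statement) =====
-- stated objective: faster
-- what changed: Replaces A's per-grader rescan of every flattened match (O(G*M)) with one counting pass over the matches into a dict (+1 winner, -1 loser, self-matches net +1 like A's elif) followed by one pass over the keys that appear in matches; same score-descending stable sort.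
import Mathlib
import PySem

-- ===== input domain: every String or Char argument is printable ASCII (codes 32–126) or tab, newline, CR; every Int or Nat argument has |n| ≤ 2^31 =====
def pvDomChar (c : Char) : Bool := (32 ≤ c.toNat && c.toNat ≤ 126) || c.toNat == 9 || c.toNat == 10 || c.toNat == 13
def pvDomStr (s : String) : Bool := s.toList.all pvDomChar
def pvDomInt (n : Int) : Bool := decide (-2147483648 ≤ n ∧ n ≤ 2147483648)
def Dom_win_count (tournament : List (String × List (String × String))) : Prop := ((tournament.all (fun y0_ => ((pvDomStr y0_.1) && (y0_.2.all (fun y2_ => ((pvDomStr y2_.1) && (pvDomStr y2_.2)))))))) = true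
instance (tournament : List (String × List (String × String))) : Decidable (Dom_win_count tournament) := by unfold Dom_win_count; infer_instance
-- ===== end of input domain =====

-- B replaces A's per-grader rescan of all matches with one counting pass over the matches
-- plus one pass over the tournament keys (objective: faster).


-- ===== PORT A =====
-- inner loop body of A: one match processed for the fixed grader g
def pvStepA (g : String) (d : PySem.Dict String Int) (m : String × String) : PySem.Dict String Int :=
  if g == m.1 then d.insert g (d.getD g 0 + 1)
  else if g == m.2 then d.insert g (d.getD g 0 - 1)
  else d

def win_count (tournament : List (String × List (String × String))) : List String :=
  let t := PySem.Dict.ofList tournament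
  let matchups := t.values.flatMap (fun sublist => sublist)
  let copeland_scores :=
    t.keys.foldl (fun d grader => matchups.foldl (pvStepA grader) d) PySem.Dict.empty
  let ranking := PySem.List.sorted copeland_scores.items (fun i => i.2) true
  ranking.map (fun p => p.1)

-- ===== PORT B =====
-- B's counting-pass body: one match updates winner (+1) and, if distinct, loser (-1)
def pvStepB (c : PySem.Dict String Int) (m : String × String) : PySem.Dict String Int :=
  let c1 := c.insert m.1 (c.getD m.1 0 + 1)
  if m.2 == m.1 then c1 else c1.insert m.2 (c1.getD m.2 0 - 1)

def win_count_alt (tournament : List (String × List (String × String))) : List String :=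
  let t := PySem.Dict.ofList tournament
  let counts := t.values.foldl (fun c matchup => matchup.foldl pvStepB c) PySem.Dict.empty
  let ranking := (t.keys.filter (fun g => counts.contains g)).map (fun g => (g, counts.getD g 0))
  (PySem.List.sorted ranking (fun p => p.2) true).map (fun p => p.1)

-- ===== PRECONDITION & SPEC =====
def Spec_win_count (tournament : List (String × List (String × String))) (out : List String) : Prop := out = win_count_alt tournament
instance (tournament : List (String × List (String × String))) (out : List String) : Decidable (Spec_win_count tournament out) := by unfold Spec_win_count; infer_instance

-- ===== CLAIM (what is proved, stated in full; the proofs are below) =====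
def Claim_equal_win_count : Prop := ∀ (tournament : List (String × List (String × String))), Dom_win_count tournament → Spec_win_count tournament (win_count tournament)

-- ===== LEMMAS AND PROOFS =====

-- the Copeland score of g over the match list ms, starting from accumulator a
def pvScore (g : String) (ms : List (String × String)) (a : Int) : Int :=
  ms.foldl (fun acc m => if g = m.1 then acc + 1 else if g = m.2 then acc - 1 else acc) a

-- does g appear in some match of ms?
def pvAppears (g : String) (ms : List (String × String)) : Bool :=
  ms.any (fun m => g == m.1 || g == m.2)

theorem pvScore_not_appears (g : String) (ms : List (String × String)) (a : Int)
    (h : pvAppears g ms = false) : pvScore g ms a = a := by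
  induction ms generalizing a with
  | nil => rfl
  | cons m ms ih =>
    simp only [pvAppears, List.any_cons, Bool.or_eq_false_iff, beq_eq_false_iff_ne, ne_eq] at h
    simp only [pvScore, List.foldl_cons, if_neg h.1.1, if_neg h.1.2]
    exact ih a (by simp [pvAppears, h.2])

theorem pvA_inner (g : String) (ms : List (String × String)) (d : PySem.Dict String Int) :
    ms.foldl (pvStepA g) d =
      if pvAppears g ms = true then d.insert g (pvScore g ms (d.getD g 0)) else d := by
  induction ms generalizing d with
  | nil => simp [pvAppears]
  | cons m ms ih =>
    rw [List.foldl_cons]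
    by_cases h1 : g = m.1
    · have hstep : pvStepA g d m = d.insert g (d.getD g 0 + 1) := by simp [pvStepA, h1]
      have hap : pvAppears g (m :: ms) = true := by simp [pvAppears, h1]
      have hsc : pvScore g (m :: ms) (d.getD g 0) = pvScore g ms (d.getD g 0 + 1) := by
        simp [pvScore, h1]
      rw [hstep, ih, if_pos hap, hsc]
      by_cases hap2 : pvAppears g ms = true
      · rw [if_pos hap2, PySem.Dict.getD_insert_self, PySem.Dict.insert_insert_self]
      · rw [if_neg hap2, pvScore_not_appears g ms _ (by simpa using hap2)]
    · by_cases h2 : g = m.2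
      · have hstep : pvStepA g d m = d.insert g (d.getD g 0 - 1) := by
          simp only [pvStepA, beq_iff_eq]; rw [if_neg h1, if_pos h2]
        have hap : pvAppears g (m :: ms) = true := by simp [pvAppears, h2]
        have hsc : pvScore g (m :: ms) (d.getD g 0) = pvScore g ms (d.getD g 0 - 1) := by
          simp only [pvScore, List.foldl_cons]; rw [if_neg h1, if_pos h2]
        rw [hstep, ih, if_pos hap, hsc]
        by_cases hap2 : pvAppears g ms = true
        · rw [if_pos hap2, PySem.Dict.getD_insert_self, PySem.Dict.insert_insert_self]
        · rw [if_neg hap2, pvScore_not_appears g ms _ (by simpa using hap2)]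
      · have hstep : pvStepA g d m = d := by simp [pvStepA, h1, h2]
        have hap : pvAppears g (m :: ms) = pvAppears g ms := by simp [pvAppears, h1, h2]
        have hsc : pvScore g (m :: ms) (d.getD g 0) = pvScore g ms (d.getD g 0) := by
          simp [pvScore, h1, h2]
        rw [hstep, ih, hap, hsc]

theorem pvStepB_getD (c : PySem.Dict String Int) (m : String × String) (g : String) :
    (pvStepB c m).getD g 0 =
      if g = m.1 then c.getD g 0 + 1 else if g = m.2 then c.getD g 0 - 1 else c.getD g 0 := by
  by_cases h21 : m.2 = m.1 <;> by_cases hg1 : g = m.1 <;> by_cases hg2 : g = m.2 <;>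
    simp [pvStepB, PySem.Dict.getD_insert, h21, hg1, hg2] <;> simp_all

theorem pvStepB_mem_keys (c : PySem.Dict String Int) (m : String × String) (g : String) :
    g ∈ (pvStepB c m).keys ↔ g = m.1 ∨ g = m.2 ∨ g ∈ c.keys := by
  by_cases h21 : m.2 = m.1
  · simp only [pvStepB, h21, beq_self_eq_true, if_true, PySem.Dict.mem_keys_insert]
    tauto
  · have h : (m.2 == m.1) = false := by simp [h21]
    simp only [pvStepB, h, Bool.false_eq_true, if_false, PySem.Dict.mem_keys_insert]
    tauto

theorem pvB_getD (ms : List (String × String)) (c : PySem.Dict String Int) (g : String) :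
    (ms.foldl pvStepB c).getD g 0 = pvScore g ms (c.getD g 0) := by
  induction ms generalizing c with
  | nil => rfl
  | cons m ms ih =>
    rw [List.foldl_cons, ih]
    simp only [pvScore, List.foldl_cons]
    rw [pvStepB_getD]

theorem pvB_keys (ms : List (String × String)) (c : PySem.Dict String Int) (g : String) :
    g ∈ (ms.foldl pvStepB c).keys ↔ g ∈ c.keys ∨ pvAppears g ms = true := by
  induction ms generalizing c with
  | nil => simp [pvAppears]
  | cons m ms ih =>
    rw [List.foldl_cons, ih, pvStepB_mem_keys]
    simp only [pvAppears, List.any_cons, Bool.or_eq_true, beq_iff_eq]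
    tauto

-- A's outer loop over distinct fresh graders appends one item per appearing grader
theorem pvA_outer (ms : List (String × String)) (ks : List String)
    (d : PySem.Dict String Int) (hnd : ks.Nodup) (hk : d.keys.Nodup)
    (hfresh : ∀ g ∈ ks, d.contains g = false) :
    (ks.foldl (fun d g => ms.foldl (pvStepA g) d) d).items =
      d.items ++ (ks.filter (fun g => pvAppears g ms)).map (fun g => (g, pvScore g ms 0)) := by
  induction ks generalizing d with
  | nil => simp
  | cons g ks ih =>
    obtain ⟨hgks, hnd'⟩ := List.nodup_cons.mp hnd
    have hgd : d.contains g = false := hfresh g (by simp)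
    rw [List.foldl_cons, pvA_inner g ms d, List.filter_cons]
    by_cases hap : pvAppears g ms = true
    · have hd0 : d.getD g 0 = (0 : Int) := PySem.Dict.getD_of_not_contains d 0 hgd
      rw [if_pos hap, if_pos hap, hd0]
      have hfresh' : ∀ g' ∈ ks, (d.insert g (pvScore g ms 0)).contains g' = false := by
        intro g' hg'
        rw [PySem.Dict.contains_insert]
        have hne : (g' == g) = false := by
          simp only [beq_eq_false_iff_ne, ne_eq]
          rintro rfl; exact hgks hg'
        rw [hne, hfresh g' (by simp [hg']), Bool.false_or]
      rw [ih (d.insert g (pvScore g ms 0)) hnd'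
        (PySem.Dict.nodup_keys_insert _ _ _ hk) hfresh',
        PySem.Dict.items_insert_of_not_contains d _ hgd]
      simp
    · have hap' : pvAppears g ms = false := by simpa using hap
      rw [if_neg hap, if_neg (by simp [hap'])]
      exact ih d hnd' hk (fun g' hg' => hfresh g' (by simp [hg']))

-- the items list A builds equals the ranking list B builds, over any key list without duplicates
theorem pv_main (ks : List String) (ms : List (String × String)) (hnd : ks.Nodup) :
    (ks.foldl (fun d grader => ms.foldl (pvStepA grader) d) PySem.Dict.empty).items =
      (ks.filter (fun g => (ms.foldl pvStepB PySem.Dict.empty).contains g)).map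
        (fun g => (g, (ms.foldl pvStepB PySem.Dict.empty).getD g 0)) := by
  rw [pvA_outer ms ks PySem.Dict.empty hnd
    (by rw [PySem.Dict.keys_empty]; exact List.nodup_nil)
    (fun g _ => PySem.Dict.contains_empty g)]
  have hitems0 : (PySem.Dict.empty : PySem.Dict String Int).items = [] := rfl
  rw [hitems0, List.nil_append]
  have hcont : (fun g => (ms.foldl pvStepB PySem.Dict.empty).contains g)
      = (fun g => pvAppears g ms) := by
    funext g
    have hmem := pvB_keys ms PySem.Dict.empty g
    rw [PySem.Dict.keys_empty] at hmem
    simp only [List.not_mem_nil, false_or] at hmem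
    exact Bool.eq_iff_iff.mpr ((PySem.Dict.contains_iff_mem_keys _ _).trans hmem)
  rw [hcont]
  symm
  apply List.map_congr_left
  intro g _
  rw [pvB_getD, PySem.Dict.getD_empty]

theorem win_count_eq (tournament : List (String × List (String × String))) :
    win_count tournament = win_count_alt tournament := by
  simp only [win_count, win_count_alt]
  have hflat : (PySem.Dict.ofList tournament).values.foldl
      (fun c matchup => matchup.foldl pvStepB c) PySem.Dict.empty
      = ((PySem.Dict.ofList tournament).values.flatMap (fun sublist => sublist)).foldl
          pvStepB PySem.Dict.empty := by
    rw [List.flatMap_def, List.foldl_flatten, List.foldl_map]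
  rw [hflat, pv_main _ _ (PySem.Dict.nodup_keys_ofList tournament)]

-- ===== VERDICT (by name: the statement is the Claim_ definition above) =====
theorem win_count_spec : Claim_equal_win_count := by
  intro tournament _
  unfold Spec_win_count
  exact win_count_eq tournament
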